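-- pv_equiv track=rewrite | github.com/MIsabelJ/ProgramacionPorVoz | textProcessing/services/assign/assignBranch.py | filtrar
-- ===== SOURCE A (Python) =====
-- def filtrar(indicadores, instruccion):
--     for i in reversed(range(len(instruccion))):
--         if instruccion[i] in indicadores:
--             if i > 0 and instruccion[i-1] in indicadores and instruccion[i-2] in indicadores:
--                 return (instruccion[i], i)
--             elif instruccion[i-1] in indicadores:
--                 return (instruccion[i], i)
--             else:
--                 return (instruccion[i+1], (i+1))
-- ===== SOURCE B (Python) =====
-- def filtrar(indicadores, instruccion):
--     # forward scan: find the LAST index whose token is an indicator, then branch once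
--     ind = set(indicadores)
--     idx = None
--     for i in range(len(instruccion)):
--         if instruccion[i] in ind:
--             idx = i
--     if idx is None:
--         return None
--     if instruccion[idx - 1] in ind:
--         return (instruccion[idx], idx)
--     return (instruccion[idx + 1], idx + 1)
-- ===== Notes on version B (the rewrite author's own statement) =====
-- stated objective: simpler
-- what changed: Replaces A's reverse early-exit loop with inline three-way branch by a one-time set of the indicators plus a forward scan that overwrites the last matching index, followed by a single collapsed two-way branch (A's first two branches are provably redundant).
-- outside the precondition, e.g. on filtrar(['a'], ['x']): A returns None, B returns None
import Mathlib
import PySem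

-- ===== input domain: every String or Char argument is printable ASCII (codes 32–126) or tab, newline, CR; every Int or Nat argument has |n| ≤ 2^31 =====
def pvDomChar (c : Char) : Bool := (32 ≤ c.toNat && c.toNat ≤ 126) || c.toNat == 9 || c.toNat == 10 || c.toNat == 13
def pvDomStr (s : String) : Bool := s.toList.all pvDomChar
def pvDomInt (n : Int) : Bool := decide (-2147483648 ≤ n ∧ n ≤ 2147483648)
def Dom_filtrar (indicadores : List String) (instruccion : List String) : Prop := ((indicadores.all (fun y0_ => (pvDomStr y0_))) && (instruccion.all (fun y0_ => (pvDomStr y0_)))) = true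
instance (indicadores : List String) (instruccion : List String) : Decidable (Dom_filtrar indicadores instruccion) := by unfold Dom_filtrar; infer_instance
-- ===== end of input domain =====

-- B replaces A's reverse early-exit loop with a forward find-last-index pass followed by one
-- collapsed branch (A's first two branches return the same value); objective: simpler.


-- `o` is the result of a (never-failing inside the loop) Python index; membership test `in`
def pvMemOpt (indicadores : List String) (o : Option String) : Bool :=
  match o with
  | some s => indicadores.contains s
  | none => false

-- ===== PORT A =====
-- loop 'for i in reversed(range(len(instruccion)))'; argument k+1 means current index is k;
-- none = fell through the loop (Python returns None) or the 'instruccion[i+1]' IndexError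
def filtrarLoopA (indicadores : List String) (instruccion : List String) : Nat → Option (String × Int)
  | 0 => none
  | k + 1 =>
    let i : Int := (k : Int)
    if pvMemOpt indicadores (PySem.List.pyGet? instruccion i) then
      if decide (i > 0) && pvMemOpt indicadores (PySem.List.pyGet? instruccion (i - 1))
          && pvMemOpt indicadores (PySem.List.pyGet? instruccion (i - 2)) then
        some ((PySem.List.pyGet? instruccion i).getD "", i)
      else if pvMemOpt indicadores (PySem.List.pyGet? instruccion (i - 1)) then
        some ((PySem.List.pyGet? instruccion i).getD "", i)
      else
        (PySem.List.pyGet? instruccion (i + 1)).map (fun s => (s, i + 1))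
    else filtrarLoopA indicadores instruccion k

def filtrar (indicadores : List String) (instruccion : List String) : String × Int :=
  (filtrarLoopA indicadores instruccion instruccion.length).getD ("", 0)

-- ===== PORT B =====
-- forward pass: idx ends as the last index with instruccion[i] in ind (none = no match);
-- 'indicadores' here is the set 'ind = set(indicadores)' built once by filtrar_alt
def filtrarLastIdx (indicadores : List String) (instruccion : List String) : Option Nat :=
  (List.range instruccion.length).foldl
    (fun (acc : Option Nat) (i : Nat) =>
      if pvMemOpt indicadores (PySem.List.pyGet? instruccion (i : Int)) then some i else acc)
    none

def filtrar_alt (indicadores : List String) (instruccion : List String) : String × Int :=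
  let ind : PySem.Set String := PySem.Set.ofList indicadores
  match filtrarLastIdx ind instruccion with
  | none => ("", 0)   -- Python B returns None here (outside Pre_)
  | some idx =>
    let i : Int := (idx : Int)
    if pvMemOpt ind (PySem.List.pyGet? instruccion (i - 1)) then
      ((PySem.List.pyGet? instruccion i).getD "", i)
    else
      ((PySem.List.pyGet? instruccion (i + 1)).map (fun s => (s, i + 1))).getD ("", 0)

-- ===== PRECONDITION & SPEC =====
-- Pre_ excludes (a) inputs with no indicator token, where A returns None (not a String×Int), and
-- (b) inputs whose last token is an indicator while the wrapped previous one is not, where A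
-- raises IndexError on instruccion[i+1] (B behaves identically on both in Python).
def Pre_filtrar (indicadores : List String) (instruccion : List String) : Prop :=
  (∃ s ∈ instruccion, s ∈ indicadores) ∧
  (2 ≤ instruccion.length →
    instruccion.getD (instruccion.length - 1) "" ∈ indicadores →
    instruccion.getD (instruccion.length - 2) "" ∈ indicadores)
instance (indicadores : List String) (instruccion : List String) : Decidable (Pre_filtrar indicadores instruccion) := by unfold Pre_filtrar; infer_instance

def pvWitness_filtrar : List String × List String := (["a"], ["x", "a", "y"])

def Spec_filtrar (indicadores : List String) (instruccion : List String) (out : String × Int) : Prop := out = filtrar_alt indicadores instruccion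
instance (indicadores : List String) (instruccion : List String) (out : String × Int) : Decidable (Spec_filtrar indicadores instruccion out) := by unfold Spec_filtrar; infer_instance

-- ===== CLAIM (what is proved, stated in full; the proofs are below) =====
def Claim_equal_filtrar : Prop := ∀ (indicadores : List String) (instruccion : List String), Dom_filtrar indicadores instruccion → Pre_filtrar indicadores instruccion → Spec_filtrar indicadores instruccion (filtrar indicadores instruccion)

-- ===== LEMMAS AND PROOFS =====

-- A's inner branch at the matched index, as a function (proof helper)
def pvBodyA (indicadores : List String) (instruccion : List String) (k : Nat) : Option (String × Int) :=
  let i : Int := (k : Int)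
  if decide (i > 0) && pvMemOpt indicadores (PySem.List.pyGet? instruccion (i - 1))
      && pvMemOpt indicadores (PySem.List.pyGet? instruccion (i - 2)) then
    some ((PySem.List.pyGet? instruccion i).getD "", i)
  else if pvMemOpt indicadores (PySem.List.pyGet? instruccion (i - 1)) then
    some ((PySem.List.pyGet? instruccion i).getD "", i)
  else
    (PySem.List.pyGet? instruccion (i + 1)).map (fun s => (s, i + 1))

-- B's collapsed branch at the matched index (proof helper)
def pvBodyB (indicadores : List String) (instruccion : List String) (k : Nat) : Option (String × Int) :=
  let i : Int := (k : Int)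
  if pvMemOpt indicadores (PySem.List.pyGet? instruccion (i - 1)) then
    some ((PySem.List.pyGet? instruccion i).getD "", i)
  else
    (PySem.List.pyGet? instruccion (i + 1)).map (fun s => (s, i + 1))

theorem pvBodyA_eq_pvBodyB (indicadores instruccion : List String) (k : Nat) :
    pvBodyA indicadores instruccion k = pvBodyB indicadores instruccion k := by
  unfold pvBodyA pvBodyB
  by_cases h1 : (decide ((k : Int) > 0) && pvMemOpt indicadores (PySem.List.pyGet? instruccion ((k : Int) - 1))
      && pvMemOpt indicadores (PySem.List.pyGet? instruccion ((k : Int) - 2))) = true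
  · have hm : pvMemOpt indicadores (PySem.List.pyGet? instruccion ((k : Int) - 1)) = true := by
      simp only [Bool.and_eq_true] at h1; exact h1.1.2
    simp [hm]
  · rw [if_neg h1]

theorem filtrarLoopA_eq (indicadores instruccion : List String) (k : Nat) :
    filtrarLoopA indicadores instruccion k =
      ((List.range k).foldl
        (fun (acc : Option Nat) (i : Nat) =>
          if pvMemOpt indicadores (PySem.List.pyGet? instruccion (i : Int)) then some i else acc)
        none).bind (pvBodyA indicadores instruccion) := by
  induction k with
  | zero => rfl
  | succ k ih =>
    rw [List.range_succ, List.foldl_append]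
    by_cases h : pvMemOpt indicadores (PySem.List.pyGet? instruccion (k : Int)) = true
    · simp only [filtrarLoopA, h, if_true, List.foldl_cons, List.foldl_nil, Option.bind]
      rfl
    · simp only [filtrarLoopA, h, List.foldl_cons, List.foldl_nil,
        Bool.not_eq_true] at *
      simpa [h] using ih

theorem pvMemOpt_ofList (indicadores : List String) (o : Option String) :
    pvMemOpt (PySem.Set.ofList indicadores) o = pvMemOpt indicadores o := by
  cases o with
  | none => rfl
  | some s =>
    by_cases h : s ∈ indicadores <;>
      simp [pvMemOpt, PySem.Set.mem_ofList, h]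

theorem filtrar_eq_alt (indicadores instruccion : List String) :
    filtrar indicadores instruccion = filtrar_alt indicadores instruccion := by
  unfold filtrar filtrar_alt filtrarLastIdx
  simp only [pvMemOpt_ofList]
  rw [filtrarLoopA_eq]
  cases hfold : (List.range instruccion.length).foldl
      (fun (acc : Option Nat) (i : Nat) =>
        if pvMemOpt indicadores (PySem.List.pyGet? instruccion (i : Int)) then some i else acc)
      none with
  | none => rfl
  | some idx =>
    rw [Option.bind_some, pvBodyA_eq_pvBodyB]
    unfold pvBodyB
    by_cases h : pvMemOpt indicadores (PySem.List.pyGet? instruccion ((idx : Int) - 1)) = true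
    · simp [h]
    · simp [h]

-- ===== VERDICT (by name: the statement is the Claim_ definition above) =====
theorem filtrar_spec : Claim_equal_filtrar := by
  intro indicadores instruccion _ _
  exact filtrar_eq_alt indicadores instruccion
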